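-- pv_equiv track=rewrite | github.com/divyanshuaggarwal/IE-SemParse | src/utils.py | post_process_lf
-- ===== SOURCE A (Python) =====
-- def post_process_lf(sent):
--     stck = 0
--     res = []
--
--     toks = sent.split()
--
--
--     for tok in toks:
--
--         if tok.startswith("["):
--             stck += 1
--         elif tok == ']':
--             stck -= 1
--
--         res.append(tok)
--
--         if stck == 0:
--             break
--
--
--     return ' '.join(res)
-- ===== SOURCE B (Python) =====
-- def post_process_lf(sent):
--     toks = sent.split()
--     if not toks:
--         return ''
--
--     def parse_item(rest):
--         # consume one item: a plain word, or a whole '['-opened group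
--         if not rest[0].startswith('['):
--             return rest[1:]
--         return parse_group(rest[1:])
--
--     def parse_group(rest):
--         # inside an open group: consume items until the closing ']' (or the end)
--         while rest and rest[0] != ']':
--             rest = parse_item(rest)
--         return rest[1:]
--
--     rest = parse_item(toks)
--     return ' '.join(toks[:len(toks) - len(rest)])
-- ===== Notes on version B (the rewrite author's own statement) =====
-- stated objective: alternative
-- what changed: Replaced A's counter-with-break scan by a recursive-descent parser: parse one item (a plain word, or a '['-group consumed item by item until its closing ']'), then return the tokens that item spans; no depth counter is kept.
-- outside the precondition, e.g. on post_process_lf('] ['): A returns '] [', B returns ']'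
import Mathlib
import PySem

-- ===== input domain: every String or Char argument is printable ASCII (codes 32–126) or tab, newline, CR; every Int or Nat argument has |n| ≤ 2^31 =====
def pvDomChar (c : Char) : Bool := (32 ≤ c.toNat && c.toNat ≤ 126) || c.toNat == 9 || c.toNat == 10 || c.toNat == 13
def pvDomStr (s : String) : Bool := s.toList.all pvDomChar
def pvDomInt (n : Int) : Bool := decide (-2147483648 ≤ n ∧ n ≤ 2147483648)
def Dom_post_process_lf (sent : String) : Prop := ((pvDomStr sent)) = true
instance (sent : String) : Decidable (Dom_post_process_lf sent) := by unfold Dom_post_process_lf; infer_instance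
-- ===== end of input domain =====

-- B replaces A's counter-with-break scan by a recursive-descent parser (parse one item:
-- a word, or a '['-group consumed item by item until its ']'); alternative decomposition, same cost.

-- ===== PORT A =====
-- A's loop: keep a bracket counter, append each token, break when the counter is 0.
def pvLoopA : List String → Int → List String → List String
  | [], _, res => res
  | t :: ts, stck, res =>
    let stck' := if PySem.Str.startswith t "[" then stck + 1
                 else if t == "]" then stck - 1 else stck
    let res' := res ++ [t]
    if stck' = 0 then res' else pvLoopA ts stck' res'

def post_process_lf (sent : String) : String :=
  PySem.Str.join " " (pvLoopA (PySem.Str.split₀ sent) 0 [])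

-- ===== PORT B =====
-- Source B's parse_item / parse_group, returning the unconsumed remainder; the length
-- bounds in the subtype only witness termination (the while loop is the tail recursion).
mutual
def pvParseItem : (rest : List String) → rest ≠ [] → {r : List String // r.length < rest.length}
  | h :: t, _ =>
    if PySem.Str.startswith h "[" then
      let r := pvParseGroup t
      ⟨r.val, by have := r.property; simp only [List.length_cons]; omega⟩
    else ⟨t, by simp⟩
  termination_by rest _ => (rest.length, 0)
  decreasing_by exact Prod.Lex.left _ _ (by simp)
def pvParseGroup : (rest : List String) → {r : List String // r.length ≤ rest.length}
  | [] => ⟨[], le_refl _⟩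
  | h :: t =>
    if h == "]" then ⟨t, by simp⟩
    else
      let r := pvParseItem (h :: t) (by simp)
      let r2 := pvParseGroup r.val
      ⟨r2.val, le_trans r2.property (Nat.le_of_lt r.property)⟩
  termination_by rest => (rest.length, 1)
  decreasing_by
    · exact Prod.Lex.right _ (by omega)
    · exact Prod.Lex.left _ _ r.property
end

def post_process_lf_alt (sent : String) : String :=
  match PySem.Str.split₀ sent with
  | [] => ""
  | h :: t =>
    let toks := h :: t
    let rest := (pvParseItem toks (List.cons_ne_nil h t)).val
    PySem.Str.join " " (toks.take (toks.length - rest.length))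

-- ===== PRECONDITION & SPEC =====
-- Pre_ excludes sentences whose first token is the stray close "]" followed by more tokens:
-- a malformed corner where A's counter dips negative and it returns a longer accidental prefix
-- ("] [" → "] ["), while B's parser returns just that token; both are defensible, neither specified.
def Pre_post_process_lf (sent : String) : Prop :=
  ¬ ((PySem.Str.split₀ sent).head? = some "]" ∧ 2 ≤ (PySem.Str.split₀ sent).length)
instance (sent : String) : Decidable (Pre_post_process_lf sent) := by unfold Pre_post_process_lf; infer_instance

def pvWitness_post_process_lf : String := "[IN:GET a ]"

def Spec_post_process_lf (sent : String) (out : String) : Prop := out = post_process_lf_alt sent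
instance (sent : String) (out : String) : Decidable (Spec_post_process_lf sent out) := by unfold Spec_post_process_lf; infer_instance

-- ===== CLAIM (what is proved, stated in full; the proofs are below) =====
def Claim_equal_post_process_lf : Prop := ∀ (sent : String), Dom_post_process_lf sent → Pre_post_process_lf sent → Spec_post_process_lf sent (post_process_lf sent)

-- ===== LEMMAS AND PROOFS =====

theorem pvGroup_nil : (pvParseGroup ([] : List String)).val = [] := by simp [pvParseGroup]

theorem pvItem_val (h : String) (t : List String) (hne : h :: t ≠ []) :
    (pvParseItem (h :: t) hne).val =
      if PySem.Str.startswith h "[" then (pvParseGroup t).val else t := by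
  rw [pvParseItem]; split <;> rfl

theorem pvGroup_cons (h : String) (t : List String) :
    (pvParseGroup (h :: t)).val =
      if h == "]" then t
      else if PySem.Str.startswith h "[" then (pvParseGroup (pvParseGroup t).val).val
      else (pvParseGroup t).val := by
  rw [pvParseGroup]
  split
  · rfl
  · dsimp only
    rw [pvItem_val h t]
    by_cases hs : PySem.Str.startswith h "[" = true
    · rw [if_pos hs, if_pos hs]
    · rw [if_neg hs, if_neg hs]

-- a token equal to "]" does not start with "["
theorem pvClose_not_open (h : String) (hbr : (h == "]") = true) :
    PySem.Str.startswith h "[" = false := by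
  have : h = "]" := by simpa using hbr
  subst this; decide

-- the remainder parse_group leaves is a suffix of its input
theorem pvGroup_suffix_aux : ∀ (n : Nat) (rest : List String), rest.length ≤ n →
    (pvParseGroup rest).val <:+ rest := by
  intro n
  induction n with
  | zero =>
    intro rest hlen
    have : rest = [] := by cases rest <;> simp_all
    subst this; simp [pvGroup_nil]
  | succ n ih =>
    intro rest hlen
    match rest with
    | [] => simp [pvGroup_nil]
    | h :: t =>
      have hlt : t.length ≤ n := by simp at hlen; omega
      rw [pvGroup_cons]
      by_cases hbr : (h == "]") = true
      · simp only [hbr, if_true]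
        exact List.suffix_cons _ _
      · simp only [hbr, Bool.false_eq_true, if_false]
        by_cases hsw : PySem.Str.startswith h "[" = true
        · simp only [hsw, if_true]
          have s1 := ih t hlt
          have s2 := ih (pvParseGroup t).val (le_trans (pvParseGroup t).property hlt)
          exact ((s2.trans s1).trans (List.suffix_cons _ _))
        · simp only [hsw, Bool.false_eq_true, if_false]
          exact (ih t hlt).trans (List.suffix_cons _ _)

theorem pvGroup_suffix (rest : List String) : (pvParseGroup rest).val <:+ rest :=
  pvGroup_suffix_aux rest.length rest (le_refl _)

theorem pvLoopA_nil (s : Int) (res : List String) : pvLoopA [] s res = res := rfl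

-- the key invariant: from counter s ≥ 1, A's loop consumes exactly the prefix parse_group
-- consumes and then breaks (s = 1) or continues on the remainder with counter s - 1.
theorem pvLoopA_group : ∀ (n : Nat) (rest : List String), rest.length ≤ n →
    ∀ (s : Int) (acc u : List String), 1 ≤ s → rest = u ++ (pvParseGroup rest).val →
    pvLoopA rest s acc =
      if s = 1 then acc ++ u else pvLoopA (pvParseGroup rest).val (s - 1) (acc ++ u) := by
  intro n
  induction n with
  | zero =>
    intro rest hlen s acc u hs hu
    have : rest = [] := by
      cases rest
      · rfl
      · simp at hlen
    subst this
    rw [pvGroup_nil] at hu ⊢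
    simp only [List.append_nil] at hu
    subst hu
    by_cases h1 : s = 1 <;> simp only [h1, if_true, if_false, pvLoopA_nil, List.append_nil]
  | succ n ih =>
    intro rest hlen s acc u hs hu
    match rest with
    | [] =>
      rw [pvGroup_nil] at hu ⊢
      simp only [List.append_nil] at hu
      subst hu
      by_cases h1 : s = 1 <;> simp only [h1, if_true, if_false, pvLoopA_nil, List.append_nil]
    | h :: t =>
      have hlt : t.length ≤ n := by simp at hlen; omega
      by_cases hbr : (h == "]") = true
      · -- closing token: the counter drops to s - 1 and the group ends here
        have hsw := pvClose_not_open h hbr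
        rw [pvGroup_cons] at hu ⊢
        simp only [hbr, if_true] at hu ⊢
        have hu' : u = [h] := by
          have : [h] ++ t = u ++ t := by simpa using hu
          exact (List.append_cancel_right this).symm
        subst hu'
        rw [pvLoopA]
        simp only [hsw, Bool.false_eq_true, if_false, hbr, if_true]
        by_cases h1 : s = 1
        · subst h1; simp
        · have hne : ¬ (s - 1 = 0) := by omega
          simp [hne, h1]
      · rw [pvGroup_cons] at hu ⊢
        simp only [hbr, Bool.false_eq_true, if_false] at hu ⊢
        by_cases hsw : PySem.Str.startswith h "[" = true
        · -- opening token: the counter rises; two nested uses of the IH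
          simp only [hsw, if_true] at hu ⊢
          obtain ⟨u₁, hu₁⟩ := pvGroup_suffix t
          obtain ⟨u₂, hu₂⟩ := pvGroup_suffix (pvParseGroup t).val
          rw [pvLoopA]
          simp only [hsw, if_true]
          have hne : ¬ (s + 1 = 0) := by omega
          simp only [hne, if_false]
          rw [ih t hlt (s + 1) (acc ++ [h]) u₁ (by omega) hu₁.symm]
          have hne1 : ¬ (s + 1 = 1) := by omega
          simp only [hne1, if_false]
          have hsm : s + 1 - 1 = s := by omega
          rw [hsm,
            ih (pvParseGroup t).val (le_trans (pvParseGroup t).property hlt)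
              s (acc ++ [h] ++ u₁) u₂ hs hu₂.symm]
          have hu' : u = [h] ++ u₁ ++ u₂ := by
            apply List.append_cancel_right (as := u)
              (bs := (pvParseGroup (pvParseGroup t).val).val)
            rw [← hu]
            simp only [List.append_assoc, List.cons_append, List.nil_append]
            rw [hu₂, hu₁]
          subst hu'
          by_cases h1 : s = 1 <;> simp [h1, List.append_assoc]
        · -- plain word: the counter is unchanged
          simp only [hsw, Bool.false_eq_true, if_false] at hu ⊢
          obtain ⟨u₁, hu₁⟩ := pvGroup_suffix t
          have hu' : u = [h] ++ u₁ := by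
            apply List.append_cancel_right (as := u) (bs := (pvParseGroup t).val)
            rw [← hu]; simp [hu₁]
          subst hu'
          rw [pvLoopA]
          have hne : ¬ (s = 0) := by omega
          simp only [hsw, Bool.false_eq_true, if_false, hbr, if_neg hne]
          rw [ih t hlt s (acc ++ [h]) u₁ hs hu₁.symm]
          by_cases h1 : s = 1 <;> simp [h1, List.append_assoc]

-- ===== VERDICT (by name: the statement is the Claim_ definition above) =====
theorem post_process_lf_spec : Claim_equal_post_process_lf := by
  intro sent _ hpre
  unfold Spec_post_process_lf post_process_lf post_process_lf_alt
  unfold Pre_post_process_lf at hpre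
  cases hts : PySem.Str.split₀ sent with
  | nil => decide
  | cons h t =>
    rw [hts] at hpre
    dsimp only
    rw [pvItem_val h t]
    by_cases hsw : PySem.Str.startswith h "[" = true
    · -- opening head: A breaks when the counter returns to 0, exactly at the group's end
      simp only [hsw, if_true]
      rw [pvLoopA]
      simp only [hsw, if_true]
      have hne : ¬ ((0 : Int) + 1 = 0) := by omega
      simp only [hne, if_false, List.nil_append]
      obtain ⟨u₁, hu₁⟩ := pvGroup_suffix t
      rw [pvLoopA_group t.length t (le_refl _) (0 + 1) [h] u₁ (by omega) hu₁.symm]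
      rw [if_pos (show (0 : Int) + 1 = 1 by omega)]
      have htake : (h :: t).take ((h :: t).length - (pvParseGroup t).val.length)
          = [h] ++ u₁ := by
        conv_lhs => rw [show h :: t = ([h] ++ u₁) ++ (pvParseGroup t).val by simp [hu₁]]
        have hl : (([h] ++ u₁) ++ (pvParseGroup t).val).length - (pvParseGroup t).val.length
            = ([h] ++ u₁).length := by simp; omega
        rw [hl, List.take_left]
      rw [htake]
    · -- head is not an opener: B consumes exactly one token
      simp only [hsw, Bool.false_eq_true, if_false]
      rw [pvLoopA]
      simp only [hsw, Bool.false_eq_true, if_false]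
      by_cases hbr : (h == "]") = true
      · -- under Pre_ the tail is empty: both sides return just "]"
        have hh : h = "]" := by simpa using hbr
        have ht : t = [] := by
          rcases ht : t with _ | ⟨x, xs⟩
          · rfl
          · exfalso
            apply hpre
            exact ⟨by simp [hh], by rw [ht]; simp only [List.length_cons]; omega⟩
        subst ht
        simp [hbr, pvLoopA_nil]
      · simp only [hbr, Bool.false_eq_true, if_false, List.nil_append]
        have h1 : (h :: t).length - t.length = 1 := by simp
        rw [h1]
        simp
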